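-- pv_equiv track=rewrite | github.com/pietrodevo/MPhEVD | modules/mphev.py | data_name
-- ===== SOURCE A (Python) =====
-- def data_name(lst):
--     """data name
--     """
--
--     if not isinstance(lst,list):
--         lst = [lst]
--
--     # removing nones
--     lst = [l for l in lst if l is not None]
--
--     for l in range(len(lst)):
--         if not isinstance(lst[l],list):
--             lst[l] = [lst[l]]
--
--     # extract
--     lst = [j for i in lst for j in i]
--
--     # naming
--     nam = '_'.join([str(l) for l in lst])
--
--     return nam
-- ===== SOURCE B (Python) =====
-- def data_name(lst):
--     if not isinstance(lst, list):
--         lst = [lst]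
--     nam = None
--     for head in lst:
--         if head is None:
--             continue
--         for p in (head if isinstance(head, list) else [head]):
--             if nam is None:
--                 nam = str(p)
--             else:
--                 nam += '_' + str(p)
--     return nam if nam is not None else ''
-- ===== Notes on version B (the rewrite author's own statement) =====
-- stated objective: alternative
-- what changed: Eliminates A's staged list passes (None-filter list, wrap loop, flatten comprehension, str-map) and the '_'.join entirely: B builds the result string directly in one nested loop with an Optional accumulator that is None until the first element is rendered, so the separator placement is handled by the accumulator state instead of join.
import Mathlib
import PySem

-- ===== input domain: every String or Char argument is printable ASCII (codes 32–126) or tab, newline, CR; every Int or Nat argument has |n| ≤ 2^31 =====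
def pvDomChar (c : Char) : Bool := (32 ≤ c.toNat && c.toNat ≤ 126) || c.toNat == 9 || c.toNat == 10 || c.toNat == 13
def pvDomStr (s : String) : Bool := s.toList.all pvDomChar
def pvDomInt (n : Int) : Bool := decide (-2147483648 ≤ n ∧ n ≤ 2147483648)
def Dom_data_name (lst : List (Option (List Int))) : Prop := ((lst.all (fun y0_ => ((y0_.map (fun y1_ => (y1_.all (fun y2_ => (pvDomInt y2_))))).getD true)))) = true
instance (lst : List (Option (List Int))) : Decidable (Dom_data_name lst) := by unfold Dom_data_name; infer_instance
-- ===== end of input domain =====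

-- B drops A's staged passes (None-filter list, flatten comprehension, str-map, '_'.join) and instead
-- builds the result string directly in one nested loop with an Option-String accumulator; objective: alternative.

-- ===== PORT A =====
-- A: filter out Nones; each survivor is already a list under this type (the wrap branch never fires),
-- so the wrap loop is the identity; flatten; map str; '_'.join.
def data_name (lst : List (Option (List Int))) : String :=
  let l1 := lst.filter (fun l => l ≠ none)
  let l2 := l1.map (fun o => o.getD [])
  let l3 := l2.flatten
  PySem.Str.join "_" (l3.map PySem.Int.toStr)

-- ===== PORT B =====
-- B: single nested loop; nam is none until the first rendered element, then grows by "_" ++ str(p).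
def data_name_alt (lst : List (Option (List Int))) : String :=
  let nam := lst.foldl (fun nam head =>
    match head with
    | none => nam
    | some xs => xs.foldl (fun nam p =>
        match nam with
        | none => some (PySem.Int.toStr p)
        | some s => some (s ++ "_" ++ PySem.Int.toStr p)) nam) none
  match nam with
  | none => ""
  | some s => s

-- ===== PRECONDITION & SPEC =====
def Spec_data_name (lst : List (Option (List Int))) (out : String) : Prop := out = data_name_alt lst
instance (lst : List (Option (List Int))) (out : String) : Decidable (Spec_data_name lst out) := by unfold Spec_data_name; infer_instance

-- ===== CLAIM (what is proved, stated in full; the proofs are below) =====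
def Claim_equal_data_name : Prop := ∀ (lst : List (Option (List Int))), Dom_data_name lst → Spec_data_name lst (data_name lst)

-- ===== LEMMAS AND PROOFS =====

-- the separator-placement step of B, abstracted over the already-rendered string
def pvStep (nam : Option String) (s : String) : Option String :=
  match nam with
  | none => some s
  | some t => some (t ++ "_" ++ s)

theorem pv_join_cons_cons (p q : String) (rest : List String) :
    PySem.Str.join "_" (p :: q :: rest) = p ++ "_" ++ PySem.Str.join "_" (q :: rest) := by
  apply String.toList_injective
  simp [PySem.Str.toList_join, PySem.Chars.join_cons_cons]

theorem pv_join_singleton (x : String) : PySem.Str.join "_" [x] = x := by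
  apply String.toList_injective
  simp [PySem.Str.toList_join, PySem.Chars.join_singleton]

theorem pv_foldl_step_some (l : List String) (x : String) :
    l.foldl pvStep (some x) = some (PySem.Str.join "_" (x :: l)) := by
  induction l generalizing x with
  | nil => simp [pv_join_singleton]
  | cons y t ih =>
    simp only [List.foldl_cons, pvStep, ih]
    cases t with
    | nil => simp [pv_join_singleton, pv_join_cons_cons, String.append_assoc]
    | cons c t' => simp [pv_join_cons_cons, String.append_assoc]

theorem pv_inner_eq (xs : List Int) (nam : Option String) :
    xs.foldl (fun nam p =>
        match nam with
        | none => some (PySem.Int.toStr p)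
        | some s => some (s ++ "_" ++ PySem.Int.toStr p)) nam
      = (xs.map PySem.Int.toStr).foldl pvStep nam := by
  rw [List.foldl_map]
  rfl

theorem pv_outer_eq (lst : List (Option (List Int))) (nam : Option String) :
    lst.foldl (fun nam head =>
      match head with
      | none => nam
      | some xs => xs.foldl (fun nam p =>
          match nam with
          | none => some (PySem.Int.toStr p)
          | some s => some (s ++ "_" ++ PySem.Int.toStr p)) nam) nam
    = ((((lst.filter (fun l => l ≠ none)).map (fun o => o.getD [])).flatten).map PySem.Int.toStr).foldl pvStep nam := by
  induction lst generalizing nam with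
  | nil => simp
  | cons h t ih =>
    cases h with
    | none => simpa using ih nam
    | some xs =>
      rw [List.foldl_cons, ih]
      simp only [pv_inner_eq]
      simp [List.foldl_append]

-- ===== VERDICT (by name: the statement is the Claim_ definition above) =====
theorem pv_join_nil_str : PySem.Str.join "_" ([] : List String) = "" := by
  apply String.toList_injective
  simp [PySem.Str.toList_join, PySem.Chars.join_nil]

theorem data_name_spec : Claim_equal_data_name := by
  intro lst _
  unfold Spec_data_name data_name data_name_alt
  dsimp only
  rw [pv_outer_eq]
  generalize (((lst.filter (fun l => l ≠ none)).map (fun o => o.getD [])).flatten).map PySem.Int.toStr = P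
  cases P with
  | nil => simp [pv_join_nil_str]
  | cons x l =>
    rw [List.foldl_cons, show pvStep none x = some x from rfl, pv_foldl_step_some]
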